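-- pv_equiv track=rewrite | github.com/willy830704/mydungeon | maze.py | check
-- ===== SOURCE A (Python) =====
-- def check(d,maze,maze_e,maze_b):
-- 	for i in range(d):
-- 		for j in range(d):
-- 			if maze[i][j] == maze_b[i][j] and maze[i][j]==1:
-- 				return 2
-- 	for i in range(d):
-- 		for j in range(d):
-- 			if maze[i][j] == maze_e[i][j] and maze[i][j]==1:
-- 				return 1
-- 	return 0
-- ===== SOURCE B (Python) =====
-- def check(d, maze, maze_e, maze_b):
--     seen_enemy = False
--     for i in range(d):
--         for j in range(d):
--             if maze[i][j] == 1: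
--                 if maze_b[i][j] == 1:
--                     return 2
--                 if maze_e[i][j] == 1:
--                     seen_enemy = True
--     return 1 if seen_enemy else 0
-- ===== Notes on version B (the rewrite author's own statement) =====
-- stated objective: alternative
-- what changed: B makes a single pass over the grid, returning 2 eagerly on the first block overlap and remembering enemy overlaps in a flag, instead of A's two full nested scans.
-- outside the precondition, e.g. on check(2, [[1, 1], [0, 0]], [], [[0, 1], [0, 0]]): A returns 2, B raises IndexError
import Mathlib
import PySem

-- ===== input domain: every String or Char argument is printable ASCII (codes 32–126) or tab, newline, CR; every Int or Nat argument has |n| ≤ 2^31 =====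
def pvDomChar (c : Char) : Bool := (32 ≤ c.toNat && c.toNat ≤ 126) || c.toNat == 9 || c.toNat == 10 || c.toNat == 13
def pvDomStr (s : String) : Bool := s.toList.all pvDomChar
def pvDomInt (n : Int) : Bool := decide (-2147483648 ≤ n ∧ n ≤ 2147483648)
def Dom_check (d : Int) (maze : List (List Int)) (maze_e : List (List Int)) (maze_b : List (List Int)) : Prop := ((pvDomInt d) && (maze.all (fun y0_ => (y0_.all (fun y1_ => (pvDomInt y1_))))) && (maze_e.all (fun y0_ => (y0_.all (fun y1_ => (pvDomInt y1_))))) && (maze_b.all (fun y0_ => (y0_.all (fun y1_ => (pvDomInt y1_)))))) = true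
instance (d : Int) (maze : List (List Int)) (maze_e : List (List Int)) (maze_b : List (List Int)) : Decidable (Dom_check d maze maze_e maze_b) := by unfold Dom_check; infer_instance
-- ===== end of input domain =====

-- B makes one pass over the grid (return 2 eagerly, enemy overlap kept in a flag) instead of A's two full nested scans.

-- maze[i][j]: indexing helper shared by both ports; under Pre_check all accesses are in range,
-- so the .getD defaults are never used on admitted inputs.
def pvCell (m : List (List Int)) (i j : Int) : Int :=
  (PySem.List.pyGet? ((PySem.List.pyGet? m i).getD []) j).getD 0

-- ===== PORT A =====
-- Each 'for … return' loop of A becomes an 'any' over pyRange (early return = first hit).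
def check (d : Int) (maze : List (List Int)) (maze_e : List (List Int)) (maze_b : List (List Int)) : Int :=
  if (PySem.List.pyRange 0 d 1).any (fun i => (PySem.List.pyRange 0 d 1).any (fun j =>
        (pvCell maze i j == pvCell maze_b i j) && (pvCell maze i j == 1))) then 2
  else if (PySem.List.pyRange 0 d 1).any (fun i => (PySem.List.pyRange 0 d 1).any (fun j =>
        (pvCell maze i j == pvCell maze_e i j) && (pvCell maze i j == 1))) then 1
  else 0

-- ===== PORT B =====
-- B's single nested loop, as structural recursion over the flattened (i, j) cell list
-- carrying the seen_enemy flag; returning 2 stops the recursion like B's 'return 2'.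
def checkAltGo (maze maze_e maze_b : List (List Int)) : List (Int × Int) → Bool → Int
  | [], flag => if flag then 1 else 0
  | (i, j) :: rest, flag =>
    if pvCell maze i j == 1 then
      if pvCell maze_b i j == 1 then 2
      else checkAltGo maze maze_e maze_b rest (flag || (pvCell maze_e i j == 1))
    else checkAltGo maze maze_e maze_b rest flag

def check_alt (d : Int) (maze : List (List Int)) (maze_e : List (List Int)) (maze_b : List (List Int)) : Int :=
  checkAltGo maze maze_e maze_b
    ((PySem.List.pyRange 0 d 1).flatMap (fun i => (PySem.List.pyRange 0 d 1).map (fun j => (i, j)))) false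

-- ===== PRECONDITION & SPEC =====
-- Pre_check: the first d rows of all three grids exist and have length ≥ d (indices in range).
-- It excludes a few inputs where A still returns: A may return 2 from its first loop before ever
-- touching a too-short maze_e (see claim cites); B indexes maze_e during its single pass and raises there.
def Pre_check (d : Int) (maze : List (List Int)) (maze_e : List (List Int)) (maze_b : List (List Int)) : Prop :=
  d ≤ maze.length ∧ d ≤ maze_e.length ∧ d ≤ maze_b.length ∧
  (∀ r ∈ maze.take d.toNat, d ≤ r.length) ∧
  (∀ r ∈ maze_e.take d.toNat, d ≤ r.length) ∧
  (∀ r ∈ maze_b.take d.toNat, d ≤ r.length)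
instance (d : Int) (maze : List (List Int)) (maze_e : List (List Int)) (maze_b : List (List Int)) : Decidable (Pre_check d maze maze_e maze_b) := by unfold Pre_check; infer_instance

def pvWitness_check : Int × List (List Int) × List (List Int) × List (List Int) :=
  (2, [[1, 0], [0, 0]], [[0, 0], [0, 1]], [[0, 0], [0, 0]])

def Spec_check (d : Int) (maze : List (List Int)) (maze_e : List (List Int)) (maze_b : List (List Int)) (out : Int) : Prop := out = check_alt d maze maze_e maze_b
instance (d : Int) (maze : List (List Int)) (maze_e : List (List Int)) (maze_b : List (List Int)) (out : Int) : Decidable (Spec_check d maze maze_e maze_b out) := by unfold Spec_check; infer_instance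

-- ===== CLAIM (what is proved, stated in full; the proofs are below) =====
def Claim_equal_check : Prop := ∀ (d : Int) (maze : List (List Int)) (maze_e : List (List Int)) (maze_b : List (List Int)), Dom_check d maze maze_e maze_b → Pre_check d maze maze_e maze_b → Spec_check d maze maze_e maze_b (check d maze maze_e maze_b)

-- ===== LEMMAS AND PROOFS =====

-- A's per-cell test (v == b && v == 1) coincides with B's (v == 1 && b == 1).
theorem pv_cond_comm (v b : Int) : ((v == b) && (v == 1)) = ((v == 1) && (b == 1)) := by
  cases hvb : (v == b) <;> cases hv1 : (v == 1) <;> cases hb1 : (b == 1) <;>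
    simp_all [beq_iff_eq]

-- characterisation of B's loop: block overlap anywhere ⇒ 2, else flag/enemy ⇒ 1, else 0
theorem checkAltGo_eq (M E B : List (List Int)) :
    ∀ (cells : List (Int × Int)) (flag : Bool),
      checkAltGo M E B cells flag =
        if cells.any (fun c => (pvCell M c.1 c.2 == 1) && (pvCell B c.1 c.2 == 1)) then 2
        else if flag || cells.any (fun c => (pvCell M c.1 c.2 == 1) && (pvCell E c.1 c.2 == 1)) then 1
        else 0 := by
  intro cells
  induction cells with
  | nil => intro flag; cases flag <;> rfl
  | cons c rest ih =>
    intro flag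
    obtain ⟨i, j⟩ := c
    by_cases hm : (pvCell M i j == 1) = true
    · by_cases hb : (pvCell B i j == 1) = true
      · simp [checkAltGo, hm, hb]
      · rw [Bool.not_eq_true] at hb
        simp only [checkAltGo, List.any_cons, hm, hb, Bool.true_and, Bool.false_or, if_true]
        rw [ih]
        simp only [Bool.or_assoc, Bool.false_eq_true, if_false]
    · rw [Bool.not_eq_true] at hm
      simp only [checkAltGo, List.any_cons, hm, Bool.false_and, Bool.false_or]
      exact ih flag

-- ===== VERDICT (by name: the statement is the Claim_ definition above) =====
theorem check_spec : Claim_equal_check := by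
  intro d maze maze_e maze_b _ _
  unfold Spec_check check check_alt
  rw [checkAltGo_eq]
  simp only [List.any_flatMap, List.any_map, Function.comp_def, Bool.false_or]
  simp only [pv_cond_comm]
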